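-- pv_equiv track=rewrite | github.com/misc-de/WebApp-Manager | mainwindow_launch_export.py | _profile_path_in_argv
-- ===== SOURCE A (Python) =====
-- def _profile_path_in_argv(argv, profile_path):
--         candidate = str(profile_path or '').strip()
--         if not candidate or not argv:
--             return False
--         for index, token in enumerate(argv):
--             if token in {'-profile', '--profile', '--user-data-dir'}:
--                 if index + 1 < len(argv) and str(argv[index + 1]).strip() == candidate:
--                     return True
--                 continue
--             for prefix in ('-profile=', '--profile=', '--user-data-dir='):
--                 if str(token).startswith(prefix) and str(token).split('=', 1)[1].strip() == candidate:
--                     return True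
--         return False
-- ===== SOURCE B (Python) =====
-- def _profile_path_in_argv(argv, profile_path):
--     candidate = str(profile_path or '').strip()
--     if not candidate or not argv:
--         return False
--     # Stage 1: bare flags — judge adjacent pairs, no indices.
--     if any(token in ('-profile', '--profile', '--user-data-dir')
--            and str(nxt).strip() == candidate
--            for token, nxt in zip(argv, argv[1:])):
--         return True
--     # Stage 2: 'flag=value' tokens.
--     return any(str(token).split('=', 1)[1].strip() == candidate
--                for token in argv
--                if str(token).startswith(('-profile=', '--profile=', '--user-data-dir=')))
-- ===== Notes on version B (the rewrite author's own statement) =====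
-- stated objective: alternative
-- what changed: B replaces A's single indexed scan with early returns by two staged index-free declarative passes: an any() over zip(argv, argv[1:]) judging adjacent pairs for the bare flags, then a filter-and-any over 'flag=' tokens; correct because A's result is just existence of a matching occurrence.
import Mathlib
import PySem

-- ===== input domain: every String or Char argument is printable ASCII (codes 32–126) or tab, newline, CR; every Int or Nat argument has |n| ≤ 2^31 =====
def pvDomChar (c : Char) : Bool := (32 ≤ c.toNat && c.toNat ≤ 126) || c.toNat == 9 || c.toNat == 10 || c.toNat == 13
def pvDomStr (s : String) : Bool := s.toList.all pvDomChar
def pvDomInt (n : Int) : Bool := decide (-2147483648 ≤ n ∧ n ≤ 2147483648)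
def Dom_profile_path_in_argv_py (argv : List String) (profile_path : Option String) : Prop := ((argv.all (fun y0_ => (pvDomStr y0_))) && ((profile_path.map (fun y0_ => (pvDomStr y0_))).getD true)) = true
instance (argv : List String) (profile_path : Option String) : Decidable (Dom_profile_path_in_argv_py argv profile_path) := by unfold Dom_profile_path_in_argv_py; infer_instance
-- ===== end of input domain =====

-- B replaces A's indexed early-return scan by two staged index-free passes (zip with the
-- tail for bare flags, then filter-and-any for 'flag=' tokens): alternative decomposition.

-- candidate = str(profile_path or '').strip()
def pvCandidate (profile_path : Option String) : String :=
  PySem.Str.strip (match profile_path with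
    | none => ""
    | some s => if s == "" then "" else s)

-- str(token).split('=', 1)[1].strip() — the [1] access is in range whenever token
-- contains '=' (both programs only evaluate it under a startswith guard), so the
-- total pyGetD form is exact there.
def pvEqVal (token : String) : String :=
  PySem.Str.strip (PySem.List.pyGetD ((PySem.Str.splitMax? token "=" 1).getD []) 1 "")

-- ===== PORT A =====
-- the for-loop over enumerate(argv) with early return True
def pvA_loop (argv : List String) (candidate : String) : List (Int × String) → Bool
  | [] => false
  | (i, token) :: rest =>
    if token == "-profile" || token == "--profile" || token == "--user-data-dir" then
      if decide (i + 1 < (argv.length : Int)) &&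
          (PySem.Str.strip (PySem.List.pyGetD argv (i + 1) "") == candidate) then
        true
      else pvA_loop argv candidate rest
    else
      if ["-profile=", "--profile=", "--user-data-dir="].any (fun pre =>
            PySem.Str.startswith token pre && (pvEqVal token == candidate)) then
        true
      else pvA_loop argv candidate rest

def profile_path_in_argv_py (argv : List String) (profile_path : Option String) : Bool :=
  let candidate := pvCandidate profile_path
  if candidate == "" || argv.isEmpty then false
  else pvA_loop argv candidate (PySem.List.enumerate argv 0)

-- ===== PORT B =====
-- token in ('-profile', '--profile', '--user-data-dir')
def pvIsFlag (t : String) : Bool :=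
  t == "-profile" || t == "--profile" || t == "--user-data-dir"

-- str(token).startswith(('-profile=', '--profile=', '--user-data-dir='))
def pvIsPre (t : String) : Bool :=
  ["-profile=", "--profile=", "--user-data-dir="].any (fun p => PySem.Str.startswith t p)

def profile_path_in_argv_py_alt (argv : List String) (profile_path : Option String) : Bool :=
  let candidate := pvCandidate profile_path
  if candidate == "" || argv.isEmpty then false
  else if (argv.zip argv.tail).any (fun p =>
            pvIsFlag p.1 && (PySem.Str.strip p.2 == candidate)) then true
  else (argv.filter pvIsPre).any (fun t => pvEqVal t == candidate)

-- ===== PRECONDITION & SPEC =====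
def Spec_profile_path_in_argv_py (argv : List String) (profile_path : Option String) (out : Bool) : Prop := out = profile_path_in_argv_py_alt argv profile_path
instance (argv : List String) (profile_path : Option String) (out : Bool) : Decidable (Spec_profile_path_in_argv_py argv profile_path out) := by unfold Spec_profile_path_in_argv_py; infer_instance

-- ===== CLAIM (what is proved, stated in full; the proofs are below) =====
def Claim_equal_profile_path_in_argv_py : Prop := ∀ (argv : List String) (profile_path : Option String), Dom_profile_path_in_argv_py argv profile_path → Spec_profile_path_in_argv_py argv profile_path (profile_path_in_argv_py argv profile_path)

-- ===== LEMMAS AND PROOFS =====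

-- a bare flag token never carries a 'flag=' prefix
theorem pv_flag_not_pre (t : String) (h : pvIsFlag t = true) : pvIsPre t = false := by
  unfold pvIsFlag at h
  rcases Bool.or_eq_true_iff.mp h with h | h
  · rcases Bool.or_eq_true_iff.mp h with h | h <;>
      · rw [beq_iff_eq] at h; subst h; decide
  · rw [beq_iff_eq] at h; subst h; decide

-- A's scan over the enumerated suffix = B's two staged passes over that suffix
theorem pv_main (argv : List String) (c : String) :
    ∀ (xs : List String) (k : Nat), argv.drop k = xs →
      pvA_loop argv c (PySem.List.enumerate xs (k : Int)) =
        ((xs.zip xs.tail).any (fun p => pvIsFlag p.1 && (PySem.Str.strip p.2 == c)) ||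
          (xs.filter pvIsPre).any (fun t => pvEqVal t == c)) := by
  intro xs
  induction xs with
  | nil => intro k _; simp [PySem.List.enumerate, pvA_loop]
  | cons x xs ih =>
    intro k hk
    have hk' : argv.drop (k + 1) = xs := by
      have := congrArg List.tail hk
      simpa [List.tail_drop] using this
    have hrec := ih (k + 1) hk'
    push_cast at hrec
    rw [PySem.List.enumerate_cons]
    unfold pvA_loop
    by_cases hf : pvIsFlag x = true
    · have hpre : pvIsPre x = false := pv_flag_not_pre x hf
      have hf0 : (x == "-profile" || x == "--profile" || x == "--user-data-dir") = true := hf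
      simp only [hf0, if_true]
      cases xs with
      | nil =>
        have hlen : argv.length = k + 1 := by
          have := congrArg List.length hk
          simp at this; omega
        have hnlt : ¬ ((k : Int) + 1 < (argv.length : Int)) := by
          rw [hlen]; push_cast; omega
        simp [hnlt, hpre, pvA_loop, PySem.List.enumerate]
      | cons y ys =>
        have hlen : k + 1 < argv.length := by
          have := congrArg List.length hk
          simp at this; omega
        have hsome : argv[k+1]? = some y := by
          have h0 : argv[k+1]? = (argv.drop (k+1))[0]? := by
            simp [List.getElem?_drop]
          rw [h0, hk']; rfl
        have hget : PySem.List.pyGetD argv ((k : Int) + 1) "" = y := by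
          have h1 : ((k : Int) + 1) = ((k + 1 : Nat) : Int) := by push_cast; ring
          rw [h1, PySem.List.pyGetD_natCast]
          simp [List.getD, hsome]
        have hlt : ((k : Int) + 1 < (argv.length : Int)) := by push_cast; omega
        simp only [hget, hlt, decide_true, Bool.true_and]
        cases hm : (PySem.Str.strip y == c)
        · rw [PySem.List.enumerate_cons] at hrec
          simp [hm, hrec, hpre]
        · simp only [if_true]
          simp [hm]
          exact Or.inl (Or.inl hf)
    · have hf' : (x == "-profile" || x == "--profile" || x == "--user-data-dir") = false := by
        unfold pvIsFlag at hf; simpa using hf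
      simp only [hf', Bool.false_eq_true, if_false]
      have hmix : ∀ r, (["-profile=", "--profile=", "--user-data-dir="].any (fun pre =>
            PySem.Str.startswith x pre && r)) = (pvIsPre x && r) := by
        intro r; unfold pvIsPre; cases r <;> simp [Bool.and_comm]
      rw [hmix]
      have hzip : (((x :: xs).zip xs).any fun p => pvIsFlag p.1 && (PySem.Str.strip p.2 == c)) =
          ((xs.zip xs.tail).any fun p => pvIsFlag p.1 && (PySem.Str.strip p.2 == c)) := by
        cases xs with
        | nil => rfl
        | cons y ys =>
          have hx : pvIsFlag x = false := by simpa using hf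
          simp [hx]
      cases hq : pvIsPre x
      · simp [hrec, hq, hzip]
      · cases hv : (pvEqVal x == c)
        · simp [hrec, hq, hv, hzip]
        · simp only [Bool.true_and, if_true]
          simp [hq, hv]

-- ===== VERDICT (by name: the statement is the Claim_ definition above) =====
theorem profile_path_in_argv_py_spec : Claim_equal_profile_path_in_argv_py := by
  intro argv profile_path _
  unfold Spec_profile_path_in_argv_py profile_path_in_argv_py profile_path_in_argv_py_alt
  by_cases h : (pvCandidate profile_path == "" || argv.isEmpty) = true
  · simp [h]
  · simp only [Bool.not_eq_true] at h
    simp only [h, Bool.false_eq_true, if_false]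
    have hm := pv_main argv (pvCandidate profile_path) argv 0 (by simp)
    simp only [Nat.cast_zero] at hm
    rw [hm]
    by_cases hz : ((argv.zip argv.tail).any (fun p =>
        pvIsFlag p.1 && (PySem.Str.strip p.2 == pvCandidate profile_path))) = true <;>
      simp [hz]
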